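-- pv_equiv track=rewrite | github.com/minchp2/magnet-vasp-balsam-workflow | gen_inputs_from_subs.py | ordered
-- ===== SOURCE A (Python) =====
-- def ordered(elems,group):
--     out = {k:[] for k in set(group)}
--     for el, group in zip(elems, group):
--         out[group].append(el)
--     for k in out:
--         if sorted(out[k])!=out[k]:
--             return False
--     return True
-- ===== SOURCE B (Python) =====
-- def ordered(elems, group):
--     last = {}
--     for el, g in zip(elems, group):
--         prev = last.get(g)
--         if prev is not None and el < prev:
--             return False
--         last[g] = el
--     return True
-- ===== Notes on version B (the rewrite author's own statement) =====
-- stated objective: faster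
-- what changed: Instead of materialising every group's element list in a dict and comparing each list with its sorted copy, B makes one pass keeping only the last element seen per group and fails on the first adjacent inversion.
import Mathlib
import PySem

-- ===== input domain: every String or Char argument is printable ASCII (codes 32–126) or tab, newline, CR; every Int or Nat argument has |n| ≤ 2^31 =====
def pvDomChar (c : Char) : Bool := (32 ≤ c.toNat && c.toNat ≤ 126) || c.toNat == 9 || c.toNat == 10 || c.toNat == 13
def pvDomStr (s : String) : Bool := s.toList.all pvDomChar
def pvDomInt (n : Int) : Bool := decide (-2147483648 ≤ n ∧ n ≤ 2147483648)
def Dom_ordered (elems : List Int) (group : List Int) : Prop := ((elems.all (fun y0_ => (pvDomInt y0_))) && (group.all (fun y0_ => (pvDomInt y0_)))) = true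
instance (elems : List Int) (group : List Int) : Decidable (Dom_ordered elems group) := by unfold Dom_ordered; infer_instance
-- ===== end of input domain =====

-- B replaces A's group-then-sort-each-bucket check by a single pass that keeps only the
-- last element seen per group and compares each element with it (objective: faster).

-- ===== PORT A =====
-- 'for k in out: if sorted(out[k]) != out[k]: return False / return True'; the dict iteration
-- order (from set(group)'s hash order) cannot affect this all-of-the-keys Bool result.
def orderedCheck : List Int → PySem.Dict Int (List Int) → Bool
  | [], _ => true
  | k :: ks, d =>
    if PySem.List.sorted (d.getD k []) (fun x => x) false ≠ d.getD k [] then false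
    else orderedCheck ks d

def ordered (elems : List Int) (group : List Int) : Bool :=
  -- out = {k: [] for k in set(group)}
  let out0 : PySem.Dict Int (List Int) :=
    (PySem.Set.ofList group).foldl (fun d k => d.insert k []) PySem.Dict.empty
  -- for el, group in zip(elems, group): out[group].append(el)
  -- (out[group] exists: group ∈ set(group); modify's default [] is never used)
  let out := (elems.zip group).foldl (fun d p => d.modify p.2 [] (fun l => l ++ [p.1])) out0
  orderedCheck out.keys out

-- ===== PORT B =====
def orderedAltLoop : List (Int × Int) → PySem.Dict Int Int → Bool
  | [], _ => true
  | p :: rest, last =>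
    match last.get? p.2 with
    | some prev => if p.1 < prev then false else orderedAltLoop rest (last.insert p.2 p.1)
    | none => orderedAltLoop rest (last.insert p.2 p.1)

def ordered_alt (elems : List Int) (group : List Int) : Bool :=
  orderedAltLoop (elems.zip group) PySem.Dict.empty

-- ===== PRECONDITION & SPEC =====
def Spec_ordered (elems : List Int) (group : List Int) (out : Bool) : Prop := out = ordered_alt elems group
instance (elems : List Int) (group : List Int) (out : Bool) : Decidable (Spec_ordered elems group out) := by unfold Spec_ordered; infer_instance

-- ===== CLAIM (what is proved, stated in full; the proofs are below) =====
def Claim_equal_ordered : Prop := ∀ (elems : List Int) (group : List Int), Dom_ordered elems group → Spec_ordered elems group (ordered elems group)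

-- ===== LEMMAS AND PROOFS =====

-- the sublist of elements that fall in group k
def grp (k : Int) (pairs : List (Int × Int)) : List Int :=
  (pairs.filter (fun p => p.2 == k)).map (fun p => p.1)

lemma grp_cons (k : Int) (p : Int × Int) (rest : List (Int × Int)) :
    grp k (p :: rest) = if p.2 = k then p.1 :: grp k rest else grp k rest := by
  by_cases h : p.2 = k <;> simp [grp, h]

-- after last[g] = el, group k's pending run is the tail of what it was before the pair (el, g)
lemma insert_run_eq (rest : List (Int × Int)) (last : PySem.Dict Int Int) (el g k : Int)
    (hg : last.get? g = none) :
    ((last.insert g el).get? k).toList ++ grp k rest =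
      (last.get? k).toList ++ grp k ((el, g) :: rest) := by
  by_cases hk : k = g
  · subst hk
    rw [PySem.Dict.get?_insert_self, grp_cons, hg]
    simp
  · rw [PySem.Dict.get?_insert_of_ne _ _ hk, grp_cons, if_neg (Ne.symm hk)]

-- B's loop returns true iff every group's remaining run (seeded by the remembered last
-- element, if any) is non-decreasing
lemma orderedAltLoop_iff (pairs : List (Int × Int)) (last : PySem.Dict Int Int) :
    orderedAltLoop pairs last = true ↔
      ∀ k : Int, List.IsChain (· ≤ ·) ((last.get? k).toList ++ grp k pairs) := by
  induction pairs generalizing last with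
  | nil =>
    simp only [orderedAltLoop, grp, List.filter_nil, List.map_nil, List.append_nil, true_iff]
    intro k
    cases last.get? k <;> simp
  | cons p rest ih =>
    obtain ⟨el, g⟩ := p
    simp only [orderedAltLoop]
    cases hg : last.get? g with
    | none =>
      rw [ih]
      apply forall_congr'
      intro k
      rw [insert_run_eq rest last el g k hg]
    | some prev =>
      by_cases hlt : el < prev
      · simp only [hlt, if_true]
        refine iff_of_false (by simp) (fun h => ?_)
        have := h g
        rw [grp_cons, hg] at this
        simp [List.isChain_cons_cons] at this
        omega
      · simp only [hlt, if_false]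
        rw [ih]
        constructor
        · intro h k
          by_cases hk : k = g
          · subst hk
            have := h k
            rw [PySem.Dict.get?_insert_self] at this
            rw [grp_cons, hg]
            simp only [Option.toList_some, if_true, List.nil_append, List.cons_append,
              List.isChain_cons_cons] at this ⊢
            refine ⟨by omega, ?_⟩
            simpa using this
          · have := h k
            rw [PySem.Dict.get?_insert_of_ne _ _ hk] at this
            rw [grp_cons, if_neg (Ne.symm hk)]
            exact this
        · intro h k
          by_cases hk : k = g
          · subst hk
            have := h k
            rw [grp_cons, hg] at this
            simp only [Option.toList_some, if_true, List.nil_append, List.cons_append,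
              List.isChain_cons_cons] at this
            rw [PySem.Dict.get?_insert_self]
            simpa using this.2
          · have := h k
            rw [grp_cons, if_neg (Ne.symm hk)] at this
            rw [PySem.Dict.get?_insert_of_ne _ _ hk]
            exact this

-- A's first loop: every key of the seed dict holds []
lemma out0_getD (l : List Int) (d : PySem.Dict Int (List Int)) (c : Int)
    (h : d.getD c [] = []) :
    (l.foldl (fun d k => d.insert k ([] : List Int)) d).getD c [] = [] := by
  induction l generalizing d with
  | nil => simpa using h
  | cons x xs ih =>
    simp only [List.foldl_cons]
    exact ih _ (by rw [PySem.Dict.getD_insert]; split <;> simp [h])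

-- A's second loop leaves group k's bucket holding exactly grp k pairs
lemma out_getD (pairs : List (Int × Int)) (d : PySem.Dict Int (List Int)) (c : Int) :
    (pairs.foldl (fun d p => d.modify p.2 [] (fun l => l ++ [p.1])) d).getD c [] =
      d.getD c [] ++ grp c pairs := by
  induction pairs generalizing d with
  | nil => simp [grp]
  | cons p rest ih =>
    simp only [List.foldl_cons]
    rw [ih, grp_cons, PySem.Dict.getD_modify]
    split
    · simp_all
    · rename_i hne
      rw [if_neg (fun h => hne h.symm)]
lemma orderedCheck_iff (ks : List Int) (d : PySem.Dict Int (List Int)) :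
    orderedCheck ks d = true ↔
      ∀ k ∈ ks, PySem.List.sorted (d.getD k []) (fun x => x) false = d.getD k [] := by
  induction ks with
  | nil => simp [orderedCheck]
  | cons k ks ih =>
    simp only [orderedCheck]
    split
    · simp_all
    · simp_all

lemma sorted_id_eq_self_iff (l : List Int) :
    PySem.List.sorted l (fun x => x) false = l ↔ l.Pairwise (· ≤ ·) := by
  constructor
  · intro h
    have := PySem.List.sorted_pairwise l (fun x => x)
    rwa [h] at this
  · intro h
    exact PySem.List.sorted_eq_self_of_pairwise l (fun x => x) h

lemma grp_eq_nil_of_not_mem (elems group : List Int) (k : Int) (h : k ∉ group) :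
    grp k (elems.zip group) = [] := by
  apply List.map_eq_nil_iff.mpr
  apply List.filter_eq_nil_iff.mpr
  intro p hp
  have := (List.of_mem_zip hp).2
  simp only [beq_iff_eq]
  intro hk
  exact h (hk ▸ this)

-- A returns true iff every group's list is non-decreasing
lemma ordered_iff (elems group : List Int) :
    ordered elems group = true ↔
      ∀ k : Int, List.IsChain (· ≤ ·) (grp k (elems.zip group)) := by
  unfold ordered
  rw [orderedCheck_iff]
  constructor
  · intro h k
    rw [List.isChain_iff_pairwise]
    by_cases hk : k ∈ group
    · have hmem : k ∈ ((elems.zip group).foldl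
          (fun d p => d.modify p.2 [] (fun l => l ++ [p.1]))
          ((PySem.Set.ofList group).foldl (fun d k => d.insert k ([] : List Int)) PySem.Dict.empty)).keys := by
        rw [PySem.Dict.keys_foldl_modify_key]
        rw [PySem.Set.mem_update]
        left
        rw [PySem.Dict.keys_foldl_insert, PySem.Dict.keys_empty, PySem.Set.update_nil_left,
          PySem.Set.ofList_ofList]
        exact (PySem.Set.mem_ofList group k).mpr hk
      have := h k hmem
      rw [out_getD, out0_getD _ _ _ (by simp), List.nil_append,
        sorted_id_eq_self_iff] at this
      exact this
    · rw [grp_eq_nil_of_not_mem _ _ _ hk]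
      exact List.Pairwise.nil
  · intro h k _
    rw [out_getD, out0_getD _ _ _ (by simp), List.nil_append,
      sorted_id_eq_self_iff, ← List.isChain_iff_pairwise]
    exact h k

lemma ordered_alt_iff (elems group : List Int) :
    ordered_alt elems group = true ↔
      ∀ k : Int, List.IsChain (· ≤ ·) (grp k (elems.zip group)) := by
  unfold ordered_alt
  rw [orderedAltLoop_iff]
  constructor
  · intro h k
    simpa [PySem.Dict.get?_empty] using h k
  · intro h k
    simpa [PySem.Dict.get?_empty] using h k

-- ===== VERDICT (by name: the statement is the Claim_ definition above) =====
theorem ordered_spec : Claim_equal_ordered := by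
  intro elems group _
  unfold Spec_ordered
  have ha := ordered_iff elems group
  have hb := ordered_alt_iff elems group
  cases h1 : ordered elems group <;> cases h2 : ordered_alt elems group <;> simp_all
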